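-- pv_equiv track=rewrite | github.com/codesquad-backend-study/daily-algorithm-challenge | Sully/baekjoon/B10815.py | solution
-- ===== SOURCE A (Python) =====
-- import collections
-- from typing import List
--
-- def solution(sang_cards: List[int], cards: List[int]) -> List[int]:
--     answer = []
--
--     card_map = collections.defaultdict(int)
--     for c in sang_cards:
--         card_map[c] = 1
--
--     for c in cards:
--         if c in card_map:
--             answer.append(1)
--             continue
--
--         answer.append(0)
--
--     return answer
-- ===== SOURCE B (Python) =====
-- import bisect
-- from typing import List
--
--
-- def solution(sang_cards: List[int], cards: List[int]) -> List[int]: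
--     sorted_cards = sorted(sang_cards)
--     answer = []
--     for c in cards:
--         i = bisect.bisect_left(sorted_cards, c)
--         answer.append(1 if i < len(sorted_cards) and sorted_cards[i] == c else 0)
--     return answer
-- ===== Notes on version B (the rewrite author's own statement) =====
-- stated objective: alternative
-- what changed: Replaces the hash-map build + per-query dict membership test with sorting a copy of sang_cards once and answering each query by binary search (bisect_left plus an index/equality check).
import Mathlib
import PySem

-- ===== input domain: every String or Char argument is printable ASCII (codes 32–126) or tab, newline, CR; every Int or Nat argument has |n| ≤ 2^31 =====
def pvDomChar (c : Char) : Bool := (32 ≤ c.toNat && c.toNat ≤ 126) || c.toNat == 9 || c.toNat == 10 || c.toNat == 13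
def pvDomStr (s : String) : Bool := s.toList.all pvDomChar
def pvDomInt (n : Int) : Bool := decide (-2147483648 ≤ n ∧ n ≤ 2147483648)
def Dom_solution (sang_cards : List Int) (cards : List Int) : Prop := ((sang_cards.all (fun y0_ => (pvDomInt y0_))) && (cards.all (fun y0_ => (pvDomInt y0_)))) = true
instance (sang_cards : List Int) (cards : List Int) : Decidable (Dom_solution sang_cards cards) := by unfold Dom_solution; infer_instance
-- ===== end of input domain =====

-- B replaces A's hash-map membership marking by sort-a-copy + binary search per query (alternative algorithm, return value identical).

-- ===== PORT A =====
-- card_map = defaultdict(int); for c in sang_cards: card_map[c] = 1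
-- for c in cards: append 1 if c in card_map else 0
def solution (sang_cards : List Int) (cards : List Int) : List Int :=
  let card_map : PySem.Dict Int Int :=
    sang_cards.foldl (fun d c => d.insert c 1) PySem.Dict.empty
  cards.foldl (fun answer c =>
    if card_map.contains c then answer ++ [(1 : Int)] else answer ++ [(0 : Int)]) []

-- ===== PORT B =====
-- sorted_cards = sorted(sang_cards); for c in cards: i = bisect_left(sorted_cards, c);
-- append 1 if i < len(sorted_cards) and sorted_cards[i] == c else 0
def solution_alt (sang_cards : List Int) (cards : List Int) : List Int :=
  let sorted_cards := PySem.List.sorted sang_cards (fun x => x) false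
  cards.foldl (fun answer c =>
    let i := PySem.List.bisectLeft sorted_cards c
    answer ++ [if i < sorted_cards.length ∧ sorted_cards.getD i 0 = c then (1 : Int) else 0]) []

-- ===== PRECONDITION & SPEC =====
def Spec_solution (sang_cards : List Int) (cards : List Int) (out : List Int) : Prop := out = solution_alt sang_cards cards
instance (sang_cards : List Int) (cards : List Int) (out : List Int) : Decidable (Spec_solution sang_cards cards out) := by unfold Spec_solution; infer_instance

-- ===== CLAIM (what is proved, stated in full; the proofs are below) =====
def Claim_equal_solution : Prop := ∀ (sang_cards : List Int) (cards : List Int), Dom_solution sang_cards cards → Spec_solution sang_cards cards (solution sang_cards cards)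

-- ===== LEMMAS AND PROOFS =====

-- membership in the dict A builds is membership in sang_cards
theorem contains_foldl_insert (sang_cards : List Int) (d : PySem.Dict Int Int) (c : Int) :
    (sang_cards.foldl (fun d x => d.insert x 1) d).contains c
      = (decide (c ∈ sang_cards) || d.contains c) := by
  induction sang_cards generalizing d with
  | nil => simp
  | cons x t ih =>
      simp only [List.foldl_cons, ih, PySem.Dict.contains_insert, List.mem_cons]
      by_cases hx : c = x
      · simp [hx]
      · have hbe : (c == x) = false := beq_eq_false_iff_ne.mpr hx
        simp [hx, hbe]

-- the bisect_left hit test on the sorted copy is membership in sang_cards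
theorem bisect_hit_iff (sang_cards : List Int) (c : Int) :
    (PySem.List.bisectLeft (PySem.List.sorted sang_cards (fun x => x) false) c
        < (PySem.List.sorted sang_cards (fun x => x) false).length
      ∧ (PySem.List.sorted sang_cards (fun x => x) false).getD
          (PySem.List.bisectLeft (PySem.List.sorted sang_cards (fun x => x) false) c) 0 = c)
      ↔ c ∈ sang_cards := by
  have hsorted : List.Pairwise (fun a b => a ≤ b)
      (PySem.List.sorted sang_cards (fun x => x) false) :=
    PySem.List.sorted_pairwise sang_cards (fun x => x)
  obtain ⟨hle, hlt, hge⟩ :=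
    PySem.List.bisectLeft_spec (PySem.List.sorted sang_cards (fun x => x) false) c hsorted
  constructor
  · rintro ⟨hlen, heq⟩
    rw [← PySem.List.mem_sorted sang_cards (fun x => x) false c]
    rw [List.getD_eq_getElem _ _ hlen] at heq
    exact heq ▸ List.getElem_mem hlen
  · intro hc
    have hc' : c ∈ PySem.List.sorted sang_cards (fun x => x) false :=
      (PySem.List.mem_sorted sang_cards (fun x => x) false c).mpr hc
    obtain ⟨j, hj, hcj⟩ := List.mem_iff_getElem.mp hc'
    have hij : PySem.List.bisectLeft (PySem.List.sorted sang_cards (fun x => x) false) c ≤ j := by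
      by_contra h
      exact absurd (hcj ▸ hlt j hj (by omega)) (lt_irrefl c)
    have hilen : PySem.List.bisectLeft (PySem.List.sorted sang_cards (fun x => x) false) c
        < (PySem.List.sorted sang_cards (fun x => x) false).length := lt_of_le_of_lt hij hj
    have h1 : c ≤ (PySem.List.sorted sang_cards (fun x => x) false)[
        PySem.List.bisectLeft (PySem.List.sorted sang_cards (fun x => x) false) c] :=
      hge _ hilen le_rfl
    have h2 := PySem.List.sorted_id_getElem_mono sang_cards hij hj
    refine ⟨hilen, ?_⟩
    rw [List.getD_eq_getElem _ _ hilen]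
    omega

-- ===== VERDICT (by name: the statement is the Claim_ definition above) =====
theorem solution_spec : Claim_equal_solution := by
  intro sang_cards cards _
  unfold Spec_solution solution solution_alt
  have hA : (fun (answer : List Int) (c : Int) =>
        if (sang_cards.foldl (fun d c => d.insert c (1 : Int)) PySem.Dict.empty).contains c
        then answer ++ [(1 : Int)] else answer ++ [(0 : Int)])
      = fun answer c => answer ++ [if c ∈ sang_cards then (1 : Int) else 0] := by
    funext answer c
    rw [contains_foldl_insert]
    by_cases hc : c ∈ sang_cards <;> simp [hc]
  have hB : (fun (answer : List Int) (c : Int) =>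
        answer ++ [if PySem.List.bisectLeft (PySem.List.sorted sang_cards (fun x => x) false) c
            < (PySem.List.sorted sang_cards (fun x => x) false).length
          ∧ (PySem.List.sorted sang_cards (fun x => x) false).getD
              (PySem.List.bisectLeft (PySem.List.sorted sang_cards (fun x => x) false) c) 0 = c
          then (1 : Int) else 0])
      = fun answer c => answer ++ [if c ∈ sang_cards then (1 : Int) else 0] := by
    funext answer c
    by_cases hc : c ∈ sang_cards
    · rw [if_pos ((bisect_hit_iff sang_cards c).mpr hc), if_pos hc]
    · rw [if_neg (fun h => hc ((bisect_hit_iff sang_cards c).mp h)), if_neg hc]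
  show List.foldl _ [] cards = List.foldl _ [] cards
  rw [hA, hB]
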